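-- pv_equiv track=rewrite | github.com/shinkeonkim/boj-solution-archiving-site | data/source/30348_72506544.py | f
-- ===== SOURCE A (Python) =====
-- def f(k):
--   if 1 == len(set(str(k))):
--     return True
--
--   l = [*map(int, list(str(k)))]
--
--   for i in range(1, len(l)):
--     if l[i] > l[i - 1]:
--       continue
--     return False
--
--   return True
-- ===== SOURCE B (Python) =====
-- def f(k):
--   # purely arithmetic: peel digits right-to-left with divmod, track
--   # "all digits equal" and "strictly decreasing right-to-left" in one pass
--   prev = k % 10
--   k //= 10
--   allsame = True
--   inc = True
--   while k > 0:
--     d = k % 10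
--     allsame = allsame and d == prev
--     inc = inc and d < prev
--     prev = d
--     k //= 10
--   return allsame or inc
-- ===== Notes on version B (the rewrite author's own statement) =====
-- stated objective: alternative
-- what changed: B drops the string round-trip entirely: instead of str(k), a set of characters and an index loop over int-mapped digits, it peels the digits arithmetically with modulo and floor division by ten in one while-loop, tracking 'all digits equal' and 'strictly decreasing right-to-left' boolean flags.
import Mathlib
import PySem

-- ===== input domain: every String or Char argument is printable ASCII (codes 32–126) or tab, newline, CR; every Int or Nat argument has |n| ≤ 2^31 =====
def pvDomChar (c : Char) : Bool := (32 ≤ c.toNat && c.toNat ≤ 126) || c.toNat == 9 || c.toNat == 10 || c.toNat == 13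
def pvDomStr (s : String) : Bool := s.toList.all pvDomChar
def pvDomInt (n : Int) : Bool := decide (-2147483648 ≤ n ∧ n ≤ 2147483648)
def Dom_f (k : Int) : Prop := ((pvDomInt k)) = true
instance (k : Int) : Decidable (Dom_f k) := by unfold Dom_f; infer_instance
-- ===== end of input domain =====

-- B drops strings entirely: one arithmetic divmod pass over the digits tracking
-- "all equal" and "strictly decreasing right-to-left" flags (alternative decomposition).

-- ===== PORT A =====
def f (k : Int) : Bool :=
  let s := PySem.Int.toStr k
  if 1 == PySem.Set.len (PySem.Set.ofList s.toList) then true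
  else
    -- int(c): exact for digit characters; Pre_f (0 ≤ k) excludes negatives, where Python raises ValueError on '-'
    let l := s.toList.map (fun c => ((c.toNat : Int) - 48))
    (PySem.List.pyRange 1 (l.length : Int) 1).all
      (fun i => decide (PySem.List.pyGetD l i 0 > PySem.List.pyGetD l (i - 1) 0))

-- ===== PORT B =====
-- termination helper for the while-loop recursion (cited by the port's decreasing_by)
theorem pvFloordivTenLt (k : Int) (h : 0 < k) :
    (PySem.Int.floordiv k 10).toNat < k.toNat := by
  rw [PySem.Int.floordiv, Int.fdiv_eq_ediv_of_nonneg _ (by norm_num)]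
  omega

-- the while-loop of Source B: state (k, prev, allsame, inc)
def fAltLoop (k prev : Int) (allsame inc : Bool) : Bool :=
  if h : 0 < k then
    let d := PySem.Int.mod k 10
    fAltLoop (PySem.Int.floordiv k 10) d (allsame && (d == prev)) (inc && decide (d < prev))
  else allsame || inc
termination_by k.toNat
decreasing_by exact pvFloordivTenLt k h

def f_alt (k : Int) : Bool :=
  fAltLoop (PySem.Int.floordiv k 10) (PySem.Int.mod k 10) true true

-- ===== PRECONDITION & SPEC =====
-- Pre_f excludes negative k, on which Python A raises ValueError (int('-')).
def Pre_f (k : Int) : Prop := 0 ≤ k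
instance (k : Int) : Decidable (Pre_f k) := by unfold Pre_f; infer_instance
def pvWitness_f : Int := (12)
def Spec_f (k : Int) (out : Bool) : Prop := out = f_alt k
instance (k : Int) (out : Bool) : Decidable (Spec_f k out) := by unfold Spec_f; infer_instance

-- ===== CLAIM (what is proved, stated in full; the proofs are below) =====
def Claim_equal_f : Prop := ∀ (k : Int), Dom_f k → Pre_f k → Spec_f k (f k)

-- ===== LEMMAS AND PROOFS =====

-- cast helpers for Python % and // by 10 on a nonnegative int
theorem pv_mod_cast10 (n : Nat) : PySem.Int.mod (n : Int) 10 = ((n % 10 : Nat) : Int) := by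
  rw [PySem.Int.mod, Int.fmod_eq_emod, if_pos (Or.inl (by norm_num))]
  omega

theorem pv_div_cast10 (n : Nat) : PySem.Int.floordiv (n : Int) 10 = ((n / 10 : Nat) : Int) := by
  rw [PySem.Int.floordiv, Int.fdiv_eq_ediv_of_nonneg _ (by norm_num)]
  omega

-- cast a digit list to ints
def pvCast (l : List Nat) : List Int := l.map Int.ofNat

-- list form of Source B's while-loop, consuming the little-endian digit list
def pvScan : List Int → Int → Bool → Bool → Bool
  | [], _, a, i => a || i
  | d :: ds, prev, a, i => pvScan ds d (a && (d == prev)) (i && decide (d < prev))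

-- boolean adjacent-pair chain
def pvChain (r : Int → Int → Bool) : List Int → Bool
  | [] => true
  | [_] => true
  | a :: b :: t => r a b && pvChain r (b :: t)

-- ---- B-side characterization ----

theorem pv_fAltLoop_eq_pvScan (n : Nat) (prev : Int) (a i : Bool) :
    fAltLoop (n : Int) prev a i
      = pvScan (pvCast (Nat.digits 10 n)) prev a i := by
  induction n using Nat.strong_induction_on generalizing prev a i with
  | _ n ih =>
    rw [fAltLoop]
    by_cases hn : 0 < n
    · rw [dif_pos (by exact_mod_cast hn), pv_mod_cast10, pv_div_cast10,
          ih (n / 10) (Nat.div_lt_self hn (by norm_num)),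
          Nat.digits_def' (by norm_num) hn]
      rfl
    · have h0 : n = 0 := by omega
      subst h0
      rw [dif_neg (by norm_num)]
      simp [pvScan, pvCast]

theorem pv_pvScan_eq_chains (ds : List Int) (prev : Int) (a i : Bool) :
    pvScan ds prev a i
      = ((a && pvChain (fun x y => y == x) (prev :: ds))
          || (i && pvChain (fun x y => decide (y < x)) (prev :: ds))) := by
  induction ds generalizing prev a i with
  | nil => simp [pvScan, pvChain]
  | cons d ds ih =>
    rw [pvScan, ih]
    cases ds <;> simp [pvChain, Bool.and_assoc]

theorem pv_chain_iff_isChain (r : Int → Int → Bool) (l : List Int) :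
    pvChain r l = true ↔ List.IsChain (fun x y => r x y = true) l := by
  induction l with
  | nil => simpa [pvChain] using List.IsChain.nil
  | cons a t ih =>
    cases t with
    | nil => simpa [pvChain] using List.IsChain.singleton a
    | cons b t =>
      rw [pvChain, Bool.and_eq_true, ih]
      constructor
      · rintro ⟨h1, h2⟩; exact List.IsChain.cons_cons h1 h2
      · rintro (_ | _ | ⟨h1, h2⟩); exact ⟨h1, h2⟩

-- "all elements equal the head" vs "any two elements equal"
theorem pv_head_all_iff {α : Type} (c : α) (t : List α) :
    (∀ x ∈ t, x = c) ↔ (∀ x ∈ c :: t, ∀ y ∈ c :: t, x = y) := by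
  constructor
  · intro h x hx y hy
    have e : ∀ z ∈ c :: t, z = c := fun z hz => (List.mem_cons.mp hz).elim id (h z)
    rw [e x hx, e y hy]
  · intro h x hx
    exact h x (List.mem_cons_of_mem _ hx) c (List.mem_cons_self ..)

theorem pv_chainEq_iff (c : Int) (t : List Int) :
    pvChain (fun x y => y == x) (c :: t) = true ↔ ∀ x ∈ t, x = c := by
  induction t generalizing c with
  | nil => simp [pvChain]
  | cons b t ih =>
    rw [show pvChain (fun x y => y == x) (c :: b :: t) = ((b == c) && pvChain (fun x y => y == x) (b :: t)) from rfl,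
        Bool.and_eq_true, ih, beq_iff_eq]
    constructor
    · rintro ⟨rfl, h⟩ x hx
      rcases List.mem_cons.mp hx with rfl | hx
      · rfl
      · exact h x hx
    · intro h
      refine ⟨h b (List.mem_cons_self ..), fun x hx => ?_⟩
      rw [h x (List.mem_cons_of_mem _ hx), h b (List.mem_cons_self ..)]

theorem pv_chainGt_iff (l : List Int) :
    pvChain (fun x y => decide (y < x)) l = true ↔ l.reverse.Pairwise (· < ·) := by
  rw [pv_chain_iff_isChain, ← List.isChain_iff_pairwise, List.isChain_reverse]
  constructor
  · exact fun h => h.imp (fun a b hab => of_decide_eq_true hab)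
  · exact fun h => h.imp (fun a b hab => decide_eq_true hab)

-- ---- A-side: the printed string is the reversed digit list ----

theorem pv_toDigitsCore_eq (fuel n : Nat) (ds : List Char)
    (hn : 0 < n) (hfuel : n < 10 ^ fuel) :
    Nat.toDigitsCore 10 fuel n ds
      = ((Nat.digits 10 n).map Nat.digitChar).reverse ++ ds := by
  induction fuel generalizing n ds with
  | zero => simp at hfuel; omega
  | succ fuel ih =>
    rw [show Nat.toDigitsCore 10 (fuel + 1) n ds
          = (if n / 10 = 0 then Nat.digitChar (n % 10) :: ds
             else Nat.toDigitsCore 10 fuel (n / 10) (Nat.digitChar (n % 10) :: ds)) from rfl]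
    rw [Nat.digits_def' (by norm_num) hn]
    by_cases hq : n / 10 = 0
    · rw [if_pos hq, hq]
      simp [Nat.digits]
    · rw [if_neg hq, ih (n / 10) (Nat.digitChar (n % 10) :: ds) (by omega)
          (by
            rw [Nat.div_lt_iff_lt_mul (by norm_num : 0 < 10)]
            calc n < 10 ^ (fuel + 1) := hfuel
              _ = 10 ^ fuel * 10 := by ring)]
      simp

theorem pv_toChars_eq (n : Nat) (hn : 0 < n) :
    PySem.Int.toChars (n : Int) = ((Nat.digits 10 n).map Nat.digitChar).reverse := by
  rw [PySem.Int.toChars, if_neg (by omega), Nat.toDigits]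
  have h1 : ((n : Int)).toNat = n := by omega
  have h2 : n < 10 ^ (n + 1) := by
    calc n < 10 ^ n := Nat.lt_pow_self (by norm_num)
      _ ≤ 10 ^ (n + 1) := Nat.pow_le_pow_right (by norm_num) (by omega)
  rw [h1, pv_toDigitsCore_eq (n + 1) n [] hn h2]
  simp

theorem pv_digitChar_toNat (d : Nat) (hd : d < 10) :
    ((Nat.digitChar d).toNat : Int) - 48 = (d : Int) := by
  interval_cases d <;> decide

theorem pv_digitChar_inj (d e : Nat) (hd : d < 10) (he : e < 10)
    (h : Nat.digitChar d = Nat.digitChar e) : d = e := by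
  interval_cases d <;> interval_cases e <;> first | rfl | exact absurd h (by decide)

-- ---- set-size-1 test ↔ all elements equal ----

theorem pv_foldl_add_prefix {α : Type} [BEq α] (cs : List α) (acc : PySem.Set α) :
    ∃ t, cs.foldl PySem.Set.add acc = acc ++ t := by
  induction cs generalizing acc with
  | nil => exact ⟨[], by simp⟩
  | cons c cs ih =>
    rw [List.foldl_cons, PySem.Set.add]
    by_cases h : PySem.Set.contains acc c = true
    · rw [if_pos h]; exact ih acc
    · rw [if_neg h]
      obtain ⟨t, ht⟩ := ih (acc ++ [c])
      exact ⟨c :: t, by simpa using ht⟩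

theorem pv_foldl_add_singleton (cs : List Char) (a : Char) :
    (cs.foldl PySem.Set.add [a]).length = 1 ↔ ∀ c ∈ cs, c = a := by
  induction cs with
  | nil => simp
  | cons c cs ih =>
    rw [List.foldl_cons]
    by_cases h : c = a
    · subst h
      rw [show PySem.Set.add [c] c = [c] from by simp [PySem.Set.add, PySem.Set.contains], ih]
      constructor
      · intro hh x hx
        rcases List.mem_cons.mp hx with hx | hx
        · exact hx
        · exact hh x hx
      · intro hh x hx
        exact hh x (List.mem_cons_of_mem _ hx)
    · rw [show PySem.Set.add [a] c = [a] ++ [c] from by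
          simpa [PySem.Set.add, PySem.Set.contains, eq_comm] using h]
      obtain ⟨t, ht⟩ := pv_foldl_add_prefix cs ([a] ++ [c])
      rw [ht]
      constructor
      · intro hh
        exfalso
        simp at hh
      · intro hh
        exact absurd (hh c (List.mem_cons_self ..)) h

theorem pv_setlen_one_iff (c : Char) (cs : List Char) :
    (1 == PySem.Set.len (PySem.Set.ofList (c :: cs))) = true ↔ ∀ x ∈ cs, x = c := by
  rw [PySem.Set.ofList_eq_foldl, List.foldl_cons,
      show PySem.Set.add ([] : PySem.Set Char) c = [c] from by
        simp [PySem.Set.add, PySem.Set.contains]]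
  rw [beq_iff_eq, PySem.Set.len,
      show ((1 : Int) = ((cs.foldl PySem.Set.add [c]).length : Int))
        ↔ (cs.foldl PySem.Set.add [c]).length = 1 from by omega]
  exact pv_foldl_add_singleton cs c

-- ---- A's range-scan over l holds iff l is pairwise strictly increasing ----

theorem pv_scan_iff_pairwise (l : List Int) :
    ((PySem.List.pyRange 1 (l.length : Int) 1).all
      (fun i => decide (PySem.List.pyGetD l i 0 > PySem.List.pyGetD l (i - 1) 0)) = true)
      ↔ l.Pairwise (· < ·) := by
  rw [← List.isChain_iff_pairwise, List.isChain_iff_getElem, List.all_eq_true]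
  constructor
  · intro h j hj
    have hmem : ((j : Int) + 1) ∈ PySem.List.pyRange 1 (l.length : Int) 1 := by
      rw [PySem.List.mem_pyRange_one]; omega
    have := h _ hmem
    simp only [decide_eq_true_eq] at this
    rw [show ((j : Int) + 1 - 1) = ((j : Nat) : Int) by ring,
        show ((j : Int) + 1) = (((j + 1 : Nat)) : Int) by push_cast; ring,
        PySem.List.pyGetD_natCast, PySem.List.pyGetD_natCast,
        List.getD_eq_getElem _ _ (by omega), List.getD_eq_getElem _ _ (by omega)] at this
    exact this
  · intro h i hi
    rw [PySem.List.mem_pyRange_one] at hi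
    have hj : ∃ j : Nat, (i : Int) = (j : Int) + 1 ∧ j + 1 < l.length := by
      refine ⟨(i - 1).toNat, by omega, by omega⟩
    obtain ⟨j, hij, hjl⟩ := hj
    subst hij
    have := h j hjl
    rw [show ((j : Int) + 1 - 1) = ((j : Nat) : Int) by ring,
        show ((j : Int) + 1) = (((j + 1 : Nat)) : Int) by push_cast; ring,
        PySem.List.pyGetD_natCast, PySem.List.pyGetD_natCast,
        List.getD_eq_getElem _ _ (by omega), List.getD_eq_getElem _ _ (by omega),
        decide_eq_true_eq]
    exact this

-- ---- assembly ----

theorem pv_main (n : Nat) (hn : 0 < n) : f (n : Int) = f_alt (n : Int) := by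
  have hDne : Nat.digits 10 n ≠ [] := Nat.digits_ne_nil_iff_ne_zero.mpr (by omega)
  obtain ⟨d0, Dt, hD⟩ := List.exists_cons_of_ne_nil hDne
  have hlt : ∀ d ∈ Nat.digits 10 n, d < 10 := fun d hd => Nat.digits_lt_base (by norm_num) hd
  -- the character list A works on
  have hchars : (PySem.Int.toStr (n : Int)).toList
      = ((Nat.digits 10 n).map Nat.digitChar).reverse := by
    rw [PySem.Int.toList_toStr]; exact pv_toChars_eq n hn
  -- A's int list is the reversed cast digit list
  have hmap : (((Nat.digits 10 n).map Nat.digitChar).reverse).map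
        (fun c => ((c.toNat : Int) - 48))
      = (pvCast (Nat.digits 10 n)).reverse := by
    unfold pvCast
    rw [List.map_reverse, List.map_map]
    exact congrArg List.reverse
      (List.map_congr_left (fun d hd => by simpa using pv_digitChar_toNat d (hlt d hd)))
  -- B's value as two chains over the little-endian digit list
  have hB : f_alt (n : Int)
      = (pvChain (fun x y => y == x) (pvCast (Nat.digits 10 n))
          || pvChain (fun x y => decide (y < x)) (pvCast (Nat.digits 10 n))) := by
    rw [f_alt, pv_mod_cast10, pv_div_cast10, pv_fAltLoop_eq_pvScan, pv_pvScan_eq_chains]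
    rw [show ((n % 10 : Nat) : Int) :: pvCast (Nat.digits 10 (n / 10))
          = pvCast (Nat.digits 10 n) from by
        rw [show Nat.digits 10 n = n % 10 :: Nat.digits 10 (n / 10) from
              Nat.digits_def' (by norm_num) hn]
        rfl]
    simp
  -- the all-same test on chars equals the eq-chain on digits
  have hsame : (1 == PySem.Set.len (PySem.Set.ofList (PySem.Int.toStr (n : Int)).toList))
      = pvChain (fun x y => y == x) (pvCast (Nat.digits 10 n)) := by
    rw [Bool.eq_iff_iff, hchars, hD]
    obtain ⟨c0, Ct, hC⟩ := List.exists_cons_of_ne_nil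
      (l := ((d0 :: Dt).map Nat.digitChar).reverse) (by simp)
    rw [hC, pv_setlen_one_iff,
        show pvCast (d0 :: Dt) = Int.ofNat d0 :: pvCast Dt from rfl,
        pv_chainEq_iff, pv_head_all_iff c0 Ct, ← hC, pv_head_all_iff]
    rw [show Int.ofNat d0 :: pvCast Dt = pvCast (d0 :: Dt) from rfl]
    have hmemD : ∀ x, x ∈ pvCast (d0 :: Dt) ↔ ∃ d ∈ d0 :: Dt, Int.ofNat d = x := by
      intro x; rw [pvCast, List.mem_map]
    have hmemC : ∀ x, x ∈ ((d0 :: Dt).map Nat.digitChar).reverse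
        ↔ ∃ d ∈ d0 :: Dt, Nat.digitChar d = x := by
      intro x; rw [List.mem_reverse, List.mem_map]
    constructor
    · intro h x hx y hy
      obtain ⟨d, hd, rfl⟩ := (hmemD x).mp hx
      obtain ⟨e, he, rfl⟩ := (hmemD y).mp hy
      have h1 := h (Nat.digitChar d) ((hmemC _).mpr ⟨d, hd, rfl⟩)
        (Nat.digitChar e) ((hmemC _).mpr ⟨e, he, rfl⟩)
      have h2 := pv_digitChar_inj d e (hlt d (hD ▸ hd)) (hlt e (hD ▸ he)) h1
      rw [h2]
    · intro h x hx y hy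
      obtain ⟨d, hd, rfl⟩ := (hmemC x).mp hx
      obtain ⟨e, he, rfl⟩ := (hmemC y).mp hy
      have h1 := h (Int.ofNat d) ((hmemD _).mpr ⟨d, hd, rfl⟩)
        (Int.ofNat e) ((hmemD _).mpr ⟨e, he, rfl⟩)
      have h2 : d = e := Int.ofNat.inj h1
      rw [h2]
  rw [hB]
  simp only [f]
  split
  · next hCb =>
    rw [hsame.symm.trans hCb, Bool.true_or]
  · next hCb =>
    rw [hsame.symm.trans (Bool.not_eq_true _ ▸ hCb : _ = false), Bool.false_or,
        Bool.eq_iff_iff, pv_scan_iff_pairwise, pv_chainGt_iff, hchars, hmap]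

-- ===== VERDICT (by name: the statement is the Claim_ definition above) =====
theorem f_spec : Claim_equal_f := by
  intro k _ hk
  unfold Spec_f
  lift k to Nat using hk with n
  rcases Nat.eq_zero_or_pos n with h0 | hn
  · subst h0
    have hB0 : f_alt ((0 : Nat) : Int) = true := by
      rw [f_alt,
          show PySem.Int.floordiv ((0 : Nat) : Int) 10 = ((0 : Nat) : Int) from by decide,
          show PySem.Int.mod ((0 : Nat) : Int) 10 = 0 from by decide,
          pv_fAltLoop_eq_pvScan]
      rfl
    rw [hB0]
    decide
  · exact pv_main n hn
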